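-- pv_equiv track=rewrite | github.com/PranavDeepakSathya/theCudaBender | layout_module/flat_algebra.py | colex_inv
-- ===== SOURCE A (Python) =====
-- from typing import Tuple, Union, List
-- from functools import reduce
-- from operator import mul
--
-- def get_col_major_stride(shape: Tuple[int]):
--   col_major = [1]
--   for i in range(1, len(shape)):
--     col_major.append(col_major[i-1]*shape[i-1])
--   return tuple(col_major)
--
-- def colex_inv(shape: Tuple[int], idx:int):
--   size = reduce(mul,shape,1)
--   assert 0 <= idx < size
--   cs_stride = get_col_major_stride(shape)
--   res = []
--   for i in range(len(shape)):
--     res.append((idx//cs_stride[i])%shape[i])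
--
--   return tuple(res)
-- ===== SOURCE B (Python) =====
-- from functools import reduce
-- from operator import mul
--
-- def colex_inv(shape, idx):
--     size = reduce(mul, shape, 1)
--     assert 0 <= idx < size
--     res = []
--     t = idx
--     for s in shape:
--         res.append(t % s)
--         t //= s
--     return tuple(res)
-- ===== Notes on version B (the rewrite author's own statement) =====
-- stated objective: simpler
-- what changed: Drops the precomputed column-major stride table and its index-based scan; B does a single pass over the shape with one running accumulator t, appending t % s and updating t //= s.
-- outside the precondition, e.g. on colex_inv((-3, -3, 2), 7): A returns (-2, 0, 0), B returns (-2, 0, 1)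
import Mathlib
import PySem

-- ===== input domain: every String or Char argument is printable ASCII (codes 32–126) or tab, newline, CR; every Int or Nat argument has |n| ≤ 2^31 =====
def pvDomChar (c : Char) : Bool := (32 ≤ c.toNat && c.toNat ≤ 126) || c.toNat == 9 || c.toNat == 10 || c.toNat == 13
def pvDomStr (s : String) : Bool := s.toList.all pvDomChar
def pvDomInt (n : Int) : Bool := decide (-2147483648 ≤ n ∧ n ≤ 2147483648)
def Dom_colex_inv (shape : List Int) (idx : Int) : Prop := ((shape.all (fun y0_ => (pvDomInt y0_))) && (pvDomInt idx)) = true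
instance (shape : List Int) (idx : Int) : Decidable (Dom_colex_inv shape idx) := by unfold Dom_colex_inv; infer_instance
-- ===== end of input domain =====

-- ===== PORT A =====
-- B replaces A's precomputed stride table + indexed scan by one accumulator pass (objective: simpler).
def get_col_major_stride (shape : List Int) : List Int :=
  (PySem.List.pyRange 1 (shape.length : Int)).foldl
    (fun cm i => cm ++ [PySem.List.pyGetD cm (i - 1) 0 * PySem.List.pyGetD shape (i - 1) 0]) [1]

def colex_inv (shape : List Int) (idx : Int) : List Int :=
  let cs := get_col_major_stride shape
  (PySem.List.pyRange 0 (shape.length : Int)).foldl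
    (fun res i =>
      res ++ [PySem.Int.mod (PySem.Int.floordiv idx (PySem.List.pyGetD cs i 0)) (PySem.List.pyGetD shape i 0)]) []

-- ===== PORT B =====
def colex_inv_alt (shape : List Int) (idx : Int) : List Int :=
  (shape.foldl (fun st s => (st.1 ++ [PySem.Int.mod st.2 s], PySem.Int.floordiv st.2 s)) ([], idx)).1

-- ===== PRECONDITION & SPEC =====
-- Pre_ excludes (a) idx outside [0, prod shape), where A's assert raises AssertionError, and
-- (b) shapes with a non-positive dimension -- degenerate as tensor shapes; where their product still
-- exceeds idx, A returns accidental floor-division values that no specification would fix either way.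
def Pre_colex_inv (shape : List Int) (idx : Int) : Prop :=
  (∀ s ∈ shape, 1 ≤ s) ∧ 0 ≤ idx ∧ idx < shape.prod
instance (shape : List Int) (idx : Int) : Decidable (Pre_colex_inv shape idx) := by
  unfold Pre_colex_inv; infer_instance
def pvWitness_colex_inv : List Int × Int := ([2, 3], 4)
def Spec_colex_inv (shape : List Int) (idx : Int) (out : List Int) : Prop := out = colex_inv_alt shape idx
instance (shape : List Int) (idx : Int) (out : List Int) : Decidable (Spec_colex_inv shape idx out) := by unfold Spec_colex_inv; infer_instance

-- ===== CLAIM (what is proved, stated in full; the proofs are below) =====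
def Claim_equal_colex_inv : Prop := ∀ (shape : List Int) (idx : Int), Dom_colex_inv shape idx → Pre_colex_inv shape idx → Spec_colex_inv shape idx (colex_inv shape idx)

-- ===== LEMMAS AND PROOFS =====

-- reference recursion both ports are reduced to
def pvRef : List Int → Int → List Int
  | [], _ => []
  | s :: r, t => PySem.Int.mod t s :: pvRef r (PySem.Int.floordiv t s)

theorem pvAlt_aux (shape : List Int) (acc : List Int) (t : Int) :
    (shape.foldl (fun st s => (st.1 ++ [PySem.Int.mod st.2 s], PySem.Int.floordiv st.2 s)) (acc, t)).1
      = acc ++ pvRef shape t := by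
  induction shape generalizing acc t with
  | nil => simp [pvRef]
  | cons s r ih => simp [pvRef, ih]

theorem pvAlt_eq_ref (shape : List Int) (idx : Int) : colex_inv_alt shape idx = pvRef shape idx := by
  simpa using pvAlt_aux shape [] idx

theorem pvStride_aux (shape : List Int) (k : Nat) (hk : 1 ≤ k) (hn : k ≤ shape.length) :
    (PySem.List.pyRange 1 (k : Int)).foldl
      (fun cm i => cm ++ [PySem.List.pyGetD cm (i - 1) 0 * PySem.List.pyGetD shape (i - 1) 0]) [1]
      = (List.range k).map (fun i => (shape.take i).prod) := by
  induction k with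
  | zero => omega
  | succ k ih =>
    rcases Nat.eq_or_lt_of_le hk with h1 | h1
    · -- k + 1 = 1
      have : k = 0 := by omega
      subst this
      simp [PySem.List.pyRange]
    · have hk1 : 1 ≤ k := by omega
      have hkn : k ≤ shape.length := by omega
      have hkltn : k < shape.length := by omega
      have hcast : ((k + 1 : Nat) : Int) = (k : Int) + 1 := by push_cast; ring
      rw [hcast, PySem.List.pyRange_one_succ_right (by exact_mod_cast hk1), List.foldl_append,
        ih hk1 hkn]
      have hsub : ((k : Int) - 1) = ((k - 1 : Nat) : Int) := by omega
      rw [List.foldl_cons, List.foldl_nil, hsub, PySem.List.pyGetD_natCast,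
        PySem.List.pyGetD_natCast]
      have hlt : k - 1 < k := by omega
      have hget1 : (List.map (fun i => (shape.take i).prod) (List.range k)).getD (k - 1) 0
          = (shape.take (k - 1)).prod := by
        rw [List.getD_eq_getElem?_getD]
        simp [List.getElem?_map, List.getElem?_range hlt]
      have hget2 : shape.getD (k - 1) 0 = shape[k - 1]'(by omega) := by
        rw [List.getD_eq_getElem?_getD, List.getElem?_eq_getElem (by omega)]
        rfl
      rw [hget1, hget2]
      have htake : shape.take k = shape.take (k - 1) ++ [shape[k - 1]'(by omega)] := by
        have ht := List.take_add_one (l := shape) (i := k - 1)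
        have h2 : k - 1 + 1 = k := by omega
        rw [h2, List.getElem?_eq_getElem (by omega)] at ht
        simpa using ht
      have hprod : (shape.take (k - 1)).prod * shape[k - 1]'(by omega) = (shape.take k).prod := by
        rw [htake, List.prod_append, List.prod_cons, List.prod_nil, mul_one]
      rw [hprod, List.range_succ, List.map_append, List.map_cons, List.map_nil]

theorem pvA_char (shape : List Int) (idx : Int) :
    colex_inv shape idx
      = (List.range shape.length).map
          (fun i => PySem.Int.mod (PySem.Int.floordiv idx ((shape.take i).prod)) (shape.getD i 0)) := by
  unfold colex_inv
  rw [PySem.List.pyRange_zero_natCast, PySem.List.foldl_append_singleton_eq_map, List.map_map,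
    List.nil_append]
  cases hn : shape.length with
  | zero => simp
  | succ m =>
    have hstr : get_col_major_stride shape
        = (List.range (m + 1)).map (fun i => (shape.take i).prod) := by
      unfold get_col_major_stride
      rw [hn]
      exact pvStride_aux shape (m + 1) (by omega) (by omega)
    apply List.map_congr_left
    intro i hi
    have hi' : i < m + 1 := List.mem_range.mp hi
    simp only [Function.comp, hstr, PySem.List.pyGetD_natCast]
    have : (List.map (fun i => (shape.take i).prod) (List.range (m + 1))).getD i 0
        = (shape.take i).prod := by
      rw [List.getD_eq_getElem?_getD]
      simp [List.getElem?_map, List.getElem?_range hi']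
    rw [this]

theorem pvOne_le_prod (l : List Int) (h : ∀ s ∈ l, 1 ≤ s) : 1 ≤ l.prod := by
  induction l with
  | nil => simp
  | cons s r ih =>
    rw [List.prod_cons]
    have hs := h s (by simp)
    have hr : 1 ≤ r.prod := ih (fun x hx => h x (by simp [hx]))
    nlinarith

theorem pvRef_char (shape : List Int) (idx : Int) (h : ∀ s ∈ shape, 1 ≤ s) :
    pvRef shape idx
      = (List.range shape.length).map
          (fun i => PySem.Int.mod (PySem.Int.floordiv idx ((shape.take i).prod)) (shape.getD i 0)) := by
  induction shape generalizing idx with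
  | nil => simp [pvRef]
  | cons s r ih =>
    have hs : (0 : Int) < s := by have := h s (by simp); omega
    have hr : ∀ x ∈ r, (1 : Int) ≤ x := fun x hx => h x (by simp [hx])
    rw [pvRef, ih _ hr, List.length_cons, List.range_succ_eq_map, List.map_cons, List.map_map]
    congr 1
    · simp
    · apply List.map_congr_left
      intro i _
      have hp : (0 : Int) < (r.take i).prod :=
        pvOne_le_prod _ (fun x hx => hr x (List.mem_of_mem_take hx))
      have hsp : (0 : Int) < s * (r.take i).prod := by positivity
      simp only [Function.comp, List.take_succ_cons, List.prod_cons, List.getD_cons_succ]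
      rw [PySem.Int.floordiv_eq_ediv_of_pos hp, PySem.Int.floordiv_eq_ediv_of_pos hs,
        PySem.Int.floordiv_eq_ediv_of_pos hsp, Int.ediv_ediv_of_nonneg (by omega)]

-- ===== VERDICT (by name: the statement is the Claim_ definition above) =====
theorem colex_inv_spec : Claim_equal_colex_inv := by
  intro shape idx _ hpre
  unfold Spec_colex_inv
  rw [pvAlt_eq_ref, pvRef_char shape idx hpre.1, pvA_char]
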